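-- pv_equiv track=rewrite | github.com/AVEitsme/magistracy | main.py | third_task
-- ===== SOURCE A (Python) =====
-- from typing import List
--
-- def count_substring(message: str, substring: str) -> int:
--     return message.count(substring)
--
-- def third_task(texts: List[str], substring: str) -> str:
--     out_message = ""
--     cache = {}
--     for text_number, text in enumerate(texts):
--         count = count_substring(text, substring)
--         if count not in cache:
--             cache[count] = []
--         cache[count].append(text_number + 1)
--         out_message += (
--             f"Количество слов {substring} в тексте {text_number + 1} равно {count}\n"
--         )
--     out_message += f"Наибольшее количество вхождений слова {substring} в тексте(ах): {cache[max(cache)]}\n"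
--     return out_message
-- ===== SOURCE B (Python) =====
-- from typing import List
--
-- def third_task(texts: List[str], substring: str) -> str:
--     message = ""
--     counts = []
--     for i, text in enumerate(texts):
--         c = text.count(substring)
--         counts.append(c)
--         message += f"Количество слов {substring} в тексте {i + 1} равно {c}\n"
--     m = max(counts)
--     winners = [i + 1 for i, c in enumerate(counts) if c == m]
--     message += f"Наибольшее количество вхождений слова {substring} в тексте(ах): {winners}\n"
--     return message
-- ===== Notes on version B (the rewrite author's own statement) =====
-- stated objective: simpler
-- what changed: B drops A's count->indices grouping dict entirely: it keeps a flat list of counts parallel to texts and computes the max-count text numbers afterwards with a single filtering comprehension over enumerate(counts).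
import Mathlib
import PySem

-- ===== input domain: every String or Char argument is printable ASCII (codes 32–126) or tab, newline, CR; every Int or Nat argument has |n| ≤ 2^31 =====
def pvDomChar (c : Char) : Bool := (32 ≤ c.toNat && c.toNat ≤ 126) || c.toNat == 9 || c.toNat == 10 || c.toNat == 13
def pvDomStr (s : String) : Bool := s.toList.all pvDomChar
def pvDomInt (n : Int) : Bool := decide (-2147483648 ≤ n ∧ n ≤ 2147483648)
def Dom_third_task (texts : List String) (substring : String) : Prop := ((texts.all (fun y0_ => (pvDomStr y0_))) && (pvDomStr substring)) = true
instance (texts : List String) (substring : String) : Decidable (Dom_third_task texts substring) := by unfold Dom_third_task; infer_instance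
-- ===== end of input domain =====

-- B drops A's count→indices grouping dict: it keeps a flat counts list parallel to texts and
-- finds the max-count indices with a second filtering pass (objective: simpler).

-- f-string/str(list) formatting, shared verbatim by both Python programs
def pvLine (substring : String) (i c : Int) : String :=
  "Количество слов " ++ substring ++ " в тексте " ++ PySem.Int.toStr i ++ " равно " ++ PySem.Int.toStr c ++ "\n"

def pvListRepr (xs : List Int) : String :=
  "[" ++ PySem.Str.join ", " (xs.map PySem.Int.toStr) ++ "]"

def pvFinal (substring : String) (xs : List Int) : String :=
  "Наибольшее количество вхождений слова " ++ substring ++ " в тексте(ах): " ++ pvListRepr xs ++ "\n"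

-- ===== PORT A =====
def count_substring (message : String) (substring : String) : Int :=
  (PySem.Str.count message substring : Int)

def third_task (texts : List String) (substring : String) : String :=
  let st := (PySem.List.enumerate texts 0).foldl
    (fun (acc : String × PySem.Dict Int (List Int)) e =>
      let count := count_substring e.2 substring
      -- if count not in cache: cache[count] = []
      let cache := if acc.2.contains count then acc.2 else acc.2.insert count []
      -- cache[count].append(text_number + 1): the key is present, so this is Dict.modify
      let cache := cache.modify count [] (fun t => t ++ [e.1 + 1])
      (acc.1 ++ pvLine substring (e.1 + 1) count, cache))
    ("", PySem.Dict.empty)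
  -- max(cache) iterates the dict's keys; on an empty dict Python raises ValueError (texts = [], excluded by Pre_)
  match PySem.List.max? st.2.keys (fun x => x) with
  | none => ""
  | some m => st.1 ++ pvFinal substring (st.2.getD m [])

-- ===== PORT B =====
def third_task_alt (texts : List String) (substring : String) : String :=
  let st := (PySem.List.enumerate texts 0).foldl
    (fun (acc : String × List Int) e =>
      let c := (PySem.Str.count e.2 substring : Int)
      (acc.1 ++ pvLine substring (e.1 + 1) c, acc.2 ++ [c]))
    ("", [])
  -- max([]) raises ValueError (texts = [], excluded by Pre_)
  match PySem.List.max? st.2 (fun x => x) with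
  | none => ""
  | some m =>
    let winners := ((PySem.List.enumerate st.2 0).filter (fun e => e.2 == m)).map (fun e => e.1 + 1)
    st.1 ++ pvFinal substring winners

-- ===== PRECONDITION & SPEC =====
-- Pre_ excludes only texts = [], where both Pythons raise ValueError (max of an empty collection).
def Pre_third_task (texts : List String) (substring : String) : Prop := texts ≠ []
instance (texts : List String) (substring : String) : Decidable (Pre_third_task texts substring) := by unfold Pre_third_task; infer_instance

def pvWitness_third_task : List String × String := (["ab", "b"], "b")

def Spec_third_task (texts : List String) (substring : String) (out : String) : Prop := out = third_task_alt texts substring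
instance (texts : List String) (substring : String) (out : String) : Decidable (Spec_third_task texts substring out) := by unfold Spec_third_task; infer_instance

-- ===== CLAIM (what is proved, stated in full; the proofs are below) =====
def Claim_equal_third_task : Prop := ∀ (texts : List String) (substring : String), Dom_third_task texts substring → Pre_third_task texts substring → Spec_third_task texts substring (third_task texts substring)

-- ===== LEMMAS AND PROOFS =====

-- A's "if absent insert []; then append" is exactly Dict.modify with default []
theorem pv_setdefault_modify (d : PySem.Dict Int (List Int)) (c : Int) (f : List Int → List Int) :
    (if d.contains c then d else d.insert c []).modify c [] f = d.modify c [] f := by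
  by_cases h : d.contains c = true
  · simp [h]
  · simp only [Bool.not_eq_true] at h
    simp [h, PySem.Dict.modify, PySem.Dict.getD_insert_self, PySem.Dict.insert_insert_self,
      PySem.Dict.getD_of_not_contains d [] h]

-- A's loop splits into a message fold and a grouping-dict fold
theorem pv_foldA_eq (sub : String) : ∀ (l : List (Int × String)) (msg : String) (d : PySem.Dict Int (List Int)),
    l.foldl (fun (acc : String × PySem.Dict Int (List Int)) e =>
        (acc.1 ++ pvLine sub (e.1 + 1) (count_substring e.2 sub),
         (if acc.2.contains (count_substring e.2 sub) then acc.2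
          else acc.2.insert (count_substring e.2 sub) []).modify (count_substring e.2 sub) []
            (fun t => t ++ [e.1 + 1]))) (msg, d)
    = (l.foldl (fun s e => s ++ pvLine sub (e.1 + 1) (count_substring e.2 sub)) msg,
       (l.map (fun e => (count_substring e.2 sub, e.1 + 1))).foldl
         (fun d p => d.modify p.1 [] (fun t => t ++ [p.2])) d) := by
  intro l
  induction l with
  | nil => intro msg d; rfl
  | cons x xs ih =>
      intro msg d
      simp only [List.foldl_cons, List.map_cons]
      rw [ih, pv_setdefault_modify]

-- B's loop splits into the same message fold and an appended counts list
theorem pv_foldB_eq (sub : String) : ∀ (l : List (Int × String)) (msg : String) (cs : List Int),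
    l.foldl (fun (acc : String × List Int) e =>
        (acc.1 ++ pvLine sub (e.1 + 1) ((PySem.Str.count e.2 sub : Nat) : Int),
         acc.2 ++ [((PySem.Str.count e.2 sub : Nat) : Int)])) (msg, cs)
    = (l.foldl (fun s e => s ++ pvLine sub (e.1 + 1) (count_substring e.2 sub)) msg,
       cs ++ l.map (fun e => count_substring e.2 sub)) := by
  intro l
  induction l with
  | nil => intro msg cs; simp
  | cons x xs ih =>
      intro msg cs
      simp only [List.foldl_cons, List.map_cons, ih, count_substring, List.append_assoc,
        List.singleton_append]

-- max over the dict's (deduplicated) keys is max over the raw counts list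
theorem pv_max_ofList (xs : List Int) (h : xs ≠ []) :
    PySem.List.max? (PySem.Set.ofList xs) (fun x => x) = PySem.List.max? xs (fun x => x) := by
  rcases h1 : PySem.List.max? (PySem.Set.ofList xs) (fun x : Int => x) with _ | m1
  · rw [PySem.List.max?_eq_none_iff] at h1
    rcases xs with _ | ⟨x, xs⟩
    · exact absurd rfl h
    · have : x ∈ PySem.Set.ofList (x :: xs) := (PySem.Set.mem_ofList _ _).2 (by simp)
      rw [h1] at this; simp at this
  · rcases h2 : PySem.List.max? xs (fun x : Int => x) with _ | m2
    · rw [PySem.List.max?_eq_none_iff] at h2; exact absurd h2 h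
    · have hm1 : m1 ∈ xs := (PySem.Set.mem_ofList _ _).1 (PySem.List.max?_mem h1)
      have hm2 : m2 ∈ PySem.Set.ofList xs := (PySem.Set.mem_ofList _ _).2 (PySem.List.max?_mem h2)
      have le1 : m1 ≤ m2 := PySem.List.max?_isMax h2 m1 hm1
      have le2 : m2 ≤ m1 := PySem.List.max?_isMax h1 m2 hm2
      rw [le_antisymm le1 le2]

-- B's filtering pass over enumerate(counts) equals the projection of A's (count, index) pairs
theorem pv_winners (c : String → Int) (m : Int) : ∀ (texts : List String) (s : Int),
    ((PySem.List.enumerate ((PySem.List.enumerate texts s).map (fun e => c e.2)) s).filter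
        (fun e => e.2 == m)).map (fun e => e.1 + 1)
    = (((PySem.List.enumerate texts s).map (fun e => (c e.2, e.1 + 1))).filter
        (fun p => p.1 == m)).map (fun p => p.2) := by
  intro texts
  induction texts with
  | nil => intro s; simp [PySem.List.enumerate_nil]
  | cons x xs ih =>
      intro s
      simp only [PySem.List.enumerate_cons, List.map_cons, List.filter_cons]
      by_cases h : c x = m
      · simp [h, ih]
      · simp [h, ih]

-- ===== VERDICT (by name: the statement is the Claim_ definition above) =====
theorem third_task_spec : Claim_equal_third_task := by
  intro texts substring _dom hpre
  unfold Spec_third_task third_task third_task_alt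
  simp only [pv_foldA_eq substring, pv_foldB_eq substring, List.nil_append]
  have hkeys : (List.foldl (fun d p => d.modify p.1 [] fun t => t ++ [p.2]) PySem.Dict.empty
        ((PySem.List.enumerate texts 0).map (fun e => (count_substring e.2 substring, e.1 + 1)))).keys
      = PySem.Set.update PySem.Dict.empty.keys
          (((PySem.List.enumerate texts 0).map (fun e => (count_substring e.2 substring, e.1 + 1))).map
            (fun p => p.1)) :=
    PySem.Dict.keys_foldl_modify_key _ (fun p : Int × Int => p.1) []
      (fun (_ : PySem.Dict Int (List Int)) (p : Int × Int) (t : List Int) => t ++ [p.2]) PySem.Dict.empty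
  rw [hkeys, PySem.Dict.keys_empty]
  simp only [List.map_map]
  have hcomp : ((fun p : Int × Int => p.1) ∘ fun e : Int × String => (count_substring e.2 substring, e.1 + 1))
      = fun e : Int × String => count_substring e.2 substring := rfl
  rw [hcomp]
  have hne : (PySem.List.enumerate texts 0).map (fun e => count_substring e.2 substring) ≠ [] := by
    rcases texts with _ | ⟨x, xs⟩
    · exact absurd rfl hpre
    · simp [PySem.List.enumerate_cons]
  have hupd : (PySem.Set.update ([] : List Int)
      ((PySem.List.enumerate texts 0).map (fun e => count_substring e.2 substring)))
      = PySem.Set.ofList ((PySem.List.enumerate texts 0).map (fun e => count_substring e.2 substring)) := rfl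
  rw [hupd, pv_max_ofList _ hne]
  rcases hmax : PySem.List.max? ((PySem.List.enumerate texts 0).map (fun e => count_substring e.2 substring))
      (fun x : Int => x) with _ | m <;> rw [hmax]
  simp only [PySem.Dict.getD_foldl_modify_append, PySem.Dict.getD_empty, List.nil_append,
    pv_winners (fun t => count_substring t substring) m texts 0]
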